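-- pv_equiv track=rewrite | github.com/LMGUBA/musica | app.py | get_best_thumbnail
-- ===== SOURCE A (Python) =====
-- def get_best_thumbnail(thumbnails):
--     if not thumbnails:
--         return ""
--
--     for thumb in thumbnails:
--         if thumb.get('url') and 'mqdefault' in thumb.get('url', ''):
--             return thumb['url']
--
--     for thumb in thumbnails:
--         if thumb.get('url'):
--             return thumb['url']
--
--     return ""
-- ===== SOURCE B (Python) =====
-- def get_best_thumbnail(thumbnails):
--     fallback = ""
--     for thumb in thumbnails:
--         url = thumb.get('url', '')
--         if url and 'mqdefault' in url:
--             return url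
--         if not fallback and url:
--             fallback = url
--     return fallback
-- ===== Notes on version B (the rewrite author's own statement) =====
-- stated objective: simpler
-- what changed: Replaces A's two sequential scans (first for an 'mqdefault' url, then for any truthy url) by one pass that returns an 'mqdefault' url eagerly and remembers the first truthy url as a fallback.
import Mathlib
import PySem

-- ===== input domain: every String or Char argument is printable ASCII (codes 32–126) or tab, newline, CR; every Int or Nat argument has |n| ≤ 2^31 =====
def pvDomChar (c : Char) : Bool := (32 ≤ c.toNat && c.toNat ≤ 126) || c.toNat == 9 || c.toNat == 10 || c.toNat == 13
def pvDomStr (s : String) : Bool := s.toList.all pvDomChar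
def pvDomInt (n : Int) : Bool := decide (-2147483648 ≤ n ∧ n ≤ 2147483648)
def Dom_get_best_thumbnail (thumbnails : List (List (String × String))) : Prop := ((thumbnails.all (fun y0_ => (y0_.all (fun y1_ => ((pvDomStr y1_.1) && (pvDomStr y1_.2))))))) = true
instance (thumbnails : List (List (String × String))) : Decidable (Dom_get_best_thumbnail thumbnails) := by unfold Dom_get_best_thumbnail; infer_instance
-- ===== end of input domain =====

-- B collapses A's two sequential scans into one pass with a remembered first-truthy-url fallback (objective: simpler).


-- ===== PORT A =====
-- thumb.get('url') (None/'' falsy) ported as Dict.getD thumb "url" "": truthiness = ≠ "".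
-- thumb['url'] is guarded by the truthy test, so it equals the same getD value.
def pvA_url (thumb : List (String × String)) : String :=
  (PySem.Dict.mk thumb).getD "url" ""

-- first loop of A: first thumb whose url is truthy and contains 'mqdefault'
def pvA_loop1 : List (List (String × String)) → Option String
  | [] => none
  | t :: rest =>
    let u := pvA_url t
    if u ≠ "" ∧ PySem.Str.isIn "mqdefault" u = true then some u else pvA_loop1 rest

-- second loop of A: first thumb whose url is truthy
def pvA_loop2 : List (List (String × String)) → Option String
  | [] => none
  | t :: rest =>
    let u := pvA_url t
    if u ≠ "" then some u else pvA_loop2 rest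

def get_best_thumbnail (thumbnails : List (List (String × String))) : String :=
  if thumbnails = [] then ""
  else
    match pvA_loop1 thumbnails with
    | some u => u
    | none =>
      match pvA_loop2 thumbnails with
      | some u => u
      | none => ""

-- ===== PORT B =====
-- one pass; `fb` is the fallback variable of Source B
def pvB_go : List (List (String × String)) → String → String
  | [], fb => fb
  | t :: rest, fb =>
    let u := (PySem.Dict.mk t).getD "url" ""
    if u ≠ "" ∧ PySem.Str.isIn "mqdefault" u = true then u
    else pvB_go rest (if fb = "" ∧ u ≠ "" then u else fb)

def get_best_thumbnail_alt (thumbnails : List (List (String × String))) : String :=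
  pvB_go thumbnails ""

-- ===== PRECONDITION & SPEC =====
def Spec_get_best_thumbnail (thumbnails : List (List (String × String))) (out : String) : Prop := out = get_best_thumbnail_alt thumbnails
instance (thumbnails : List (List (String × String))) (out : String) : Decidable (Spec_get_best_thumbnail thumbnails out) := by unfold Spec_get_best_thumbnail; infer_instance

-- ===== CLAIM (what is proved, stated in full; the proofs are below) =====
def Claim_equal_get_best_thumbnail : Prop := ∀ (thumbnails : List (List (String × String))), Dom_get_best_thumbnail thumbnails → Spec_get_best_thumbnail thumbnails (get_best_thumbnail thumbnails)

-- ===== LEMMAS AND PROOFS =====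
-- loop invariant of B's single pass: with fallback fb, B returns the first-loop hit if any,
-- otherwise fb if already set, otherwise the second-loop hit (or "")
theorem pvB_go_eq (ts : List (List (String × String))) (fb : String) :
    pvB_go ts fb =
      match pvA_loop1 ts with
      | some u => u
      | none => if fb = "" then (pvA_loop2 ts).getD "" else fb := by
  induction ts generalizing fb with
  | nil => simp [pvB_go, pvA_loop1, pvA_loop2]
  | cons t rest ih =>
    simp only [pvB_go, pvA_loop1, pvA_loop2, pvA_url]
    by_cases h1 : (PySem.Dict.mk t).getD "url" "" ≠ "" ∧ PySem.Str.isIn "mqdefault" ((PySem.Dict.mk t).getD "url" "") = true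
    · obtain ⟨hu, hm⟩ := h1
      rw [PySem.Str.isIn_eq, show "mqdefault".toList = ['m','q','d','e','f','a','u','l','t'] from rfl] at hm
      simp [hm, hu]
    · simp only [h1, if_false, ih]
      by_cases hu : (PySem.Dict.mk t).getD "url" "" ≠ ""
      · by_cases hfb : fb = ""
        · simp [hfb, hu]
        · simp [hfb, hu]
      · simp only [ne_eq, not_not] at hu
        simp [hu]

-- ===== VERDICT (by name: the statement is the Claim_ definition above) =====
theorem get_best_thumbnail_spec : Claim_equal_get_best_thumbnail := by
  intro ts _
  unfold Spec_get_best_thumbnail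
  unfold get_best_thumbnail get_best_thumbnail_alt
  rw [pvB_go_eq]
  cases ts with
  | nil => simp [pvA_loop1, pvA_loop2]
  | cons t rest =>
    simp only [reduceCtorEq, if_false]
    cases h1 : pvA_loop1 (t :: rest) with
    | some u => rfl
    | none =>
      simp only [if_pos]
      cases h2 : pvA_loop2 (t :: rest) <;> rfl
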